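-- pv_equiv track=rewrite | github.com/zetta-app/quant.cpp | bench/generate_long_text.py | clean_wikitext
-- ===== SOURCE A (Python) =====
-- def clean_wikitext(text):
--     """
--     Remove WikiText markup artifacts:
--       - Lines starting with ' = ' (section headers)
--       - Empty lines (collapse to single newline)
--       - Leading/trailing whitespace per line
--
--     Keeps paragraph structure intact for natural PPL evaluation.
--     """
--     lines = text.split("\n")
--     cleaned = []
--     for line in lines:
--         stripped = line.strip()
--         # Skip empty lines and section headers like " = Title = "
--         if not stripped:
--             if cleaned and cleaned[-1] != "":
--                 cleaned.append("")
--             continue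
--         if stripped.startswith("= ") and stripped.endswith(" ="):
--             continue
--         cleaned.append(stripped)
--
--     return "\n".join(cleaned).strip()
-- ===== SOURCE B (Python) =====
-- from itertools import groupby
--
-- def clean_wikitext(text):
--     stripped = [ln.strip() for ln in text.split("\n")]
--     kept = [s for s in stripped if not (s.startswith("= ") and s.endswith(" ="))]
--     result = []
--     for is_blank, grp in groupby(kept, key=lambda s: s == ""):
--         if is_blank:
--             result.append("")
--         else:
--             result.extend(grp)
--     return "\n".join(result).strip()
-- ===== Notes on version B (the rewrite author's own statement) =====
-- stated objective: alternative
-- what changed: Replaces A's single stateful loop (which consults cleaned[-1] to collapse blanks and skips headers inline) by staged passes: strip all lines, filter out header lines, then collapse each run of blank lines to one empty string via itertools.groupby, joining and stripping at the end.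
import Mathlib
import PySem

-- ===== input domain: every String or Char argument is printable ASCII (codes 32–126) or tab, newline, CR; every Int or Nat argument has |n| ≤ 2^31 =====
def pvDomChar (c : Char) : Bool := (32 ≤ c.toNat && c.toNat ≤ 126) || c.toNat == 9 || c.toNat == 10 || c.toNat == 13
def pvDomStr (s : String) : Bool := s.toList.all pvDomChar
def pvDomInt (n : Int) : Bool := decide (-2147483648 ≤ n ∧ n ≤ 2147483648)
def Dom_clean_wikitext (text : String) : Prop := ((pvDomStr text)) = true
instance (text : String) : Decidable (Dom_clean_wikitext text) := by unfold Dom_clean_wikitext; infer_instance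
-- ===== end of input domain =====

-- B cleans the text in staged passes (strip, filter headers, collapse blank runs by grouping)
-- instead of A's single loop maintaining cleaned[-1] state; objective: alternative decomposition.

-- ===== PORT A =====
-- split("\n") with the literal nonempty separator: split? is some here, getD is never taken
def clean_wikitext (text : String) : String :=
  let lines := (PySem.Str.split? text "\n").getD []
  let cleaned := lines.foldl (fun cleaned line =>
    let stripped := PySem.Str.strip line
    if stripped = "" then
      (if cleaned ≠ [] ∧ cleaned.getLast? ≠ some "" then cleaned ++ [""] else cleaned)
    else if PySem.Str.startswith stripped "= " && PySem.Str.endswith stripped " =" then cleaned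
    else cleaned ++ [stripped]) []
  PySem.Str.strip (PySem.Str.join "\n" cleaned)

-- ===== PORT B =====
-- groupby(kept, key = s == ""): one "" per blank run, non-blank runs kept verbatim
def pvCollapse : List String → List String
  | [] => []
  | s :: rest =>
    if s = "" then "" :: pvCollapse (rest.dropWhile (fun t => t == ""))
    else (s :: rest.takeWhile (fun t => !(t == ""))) ++ pvCollapse (rest.dropWhile (fun t => !(t == "")))
termination_by xs => xs.length
decreasing_by
  · exact Nat.lt_succ_of_le (List.length_dropWhile_le _ _)
  · exact Nat.lt_succ_of_le (List.length_dropWhile_le _ _)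

def clean_wikitext_alt (text : String) : String :=
  let stripped := ((PySem.Str.split? text "\n").getD []).map (fun ln => PySem.Str.strip ln)
  let kept := stripped.filter (fun s => !(PySem.Str.startswith s "= " && PySem.Str.endswith s " ="))
  let result := pvCollapse kept
  PySem.Str.strip (PySem.Str.join "\n" result)

-- ===== PRECONDITION & SPEC =====
def Spec_clean_wikitext (text : String) (out : String) : Prop := out = clean_wikitext_alt text
instance (text : String) (out : String) : Decidable (Spec_clean_wikitext text out) := by unfold Spec_clean_wikitext; infer_instance

-- ===== CLAIM (what is proved, stated in full; the proofs are below) =====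
def Claim_equal_clean_wikitext : Prop := ∀ (text : String), Dom_clean_wikitext text → Spec_clean_wikitext text (clean_wikitext text)

-- ===== LEMMAS AND PROOFS =====

-- A's loop body on an already-stripped line
def pvStep (cleaned : List String) (stripped : String) : List String :=
  if stripped = "" then
    (if cleaned ≠ [] ∧ cleaned.getLast? ≠ some "" then cleaned ++ [""] else cleaned)
  else if PySem.Str.startswith stripped "= " && PySem.Str.endswith stripped " =" then cleaned
  else cleaned ++ [stripped]

lemma pvCollapse_nil : pvCollapse [] = [] := by simp [pvCollapse]

lemma pvCollapse_blank (l : List String) :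
    pvCollapse ("" :: l) = "" :: pvCollapse (l.dropWhile (fun t => t == "")) := by
  simp [pvCollapse]

lemma pvCollapse_tail (l : List String) :
    l.takeWhile (fun t => !(t == "")) ++ pvCollapse (l.dropWhile (fun t => !(t == ""))) = pvCollapse l := by
  cases l with
  | nil => simp [pvCollapse]
  | cons y t =>
    by_cases hy : y = ""
    · simp [hy, pvCollapse_blank]
    · rw [List.takeWhile_cons, List.dropWhile_cons]
      simp only [show (y == "") = false by simp [hy], Bool.false_eq_true, if_true]
      rw [pvCollapse]
      simp [hy]

lemma pvCollapse_cons_ne (s : String) (l : List String) (h : s ≠ "") :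
    pvCollapse (s :: l) = s :: pvCollapse l := by
  rw [pvCollapse]
  simp only [h, if_false]
  rw [List.cons_append, pvCollapse_tail]

-- pvCollapse of a list with non-blank head (or empty) has no leading ""
lemma pvCollapse_dW_idem (t : List String) :
    (pvCollapse (t.dropWhile (fun t => t == ""))).dropWhile (fun t => t == "")
      = pvCollapse (t.dropWhile (fun t => t == "")) := by
  induction t with
  | nil => simp [pvCollapse_nil]
  | cons h t ih =>
    by_cases hh : h = ""
    · simpa [hh] using ih
    · rw [List.dropWhile_cons]
      simp only [show (h == "") = false by simp [hh], Bool.false_eq_true, if_false]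
      rw [pvCollapse_cons_ne _ _ hh, List.dropWhile_cons]
      simp [hh]

lemma pvCollapse_dropWhile (l : List String) :
    (pvCollapse l).dropWhile (fun t => t == "") = pvCollapse (l.dropWhile (fun t => t == "")) := by
  cases l with
  | nil => simp [pvCollapse_nil]
  | cons x t =>
    by_cases hx : x = ""
    · subst hx
      rw [pvCollapse_blank, List.dropWhile_cons]
      simp only [show ("" == "") = true by simp, if_pos]
      rw [pvCollapse_dW_idem t, List.dropWhile_cons]
      simp
    · rw [pvCollapse_cons_ne _ _ hx, List.dropWhile_cons, List.dropWhile_cons]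
      simp only [show (x == "") = false by simp [hx], Bool.false_eq_true, if_false]
      exact (pvCollapse_cons_ne _ _ hx).symm

-- the central invariant of A's loop, phrased against B's collapse
lemma pvFold (ks : List String)
    (hhd : ∀ x ∈ ks, (PySem.Str.startswith x "= " && PySem.Str.endswith x " =") = false) :
    ∀ acc : List String,
      ((acc = [] ∨ acc.getLast? = some "") →
        List.foldl pvStep acc ks = acc ++ (pvCollapse ks).dropWhile (fun t => t == ""))
      ∧ ((∀ s, acc.getLast? = some s → s ≠ "") → acc ≠ [] →
        List.foldl pvStep acc ks = acc ++ pvCollapse ks) := by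
  induction ks with
  | nil => intro acc; constructor <;> intro _ <;> simp [pvCollapse_nil]
  | cons x rest ih =>
    have hx' := hhd x (List.mem_cons_self)
    have hrest : ∀ y ∈ rest, (PySem.Str.startswith y "= " && PySem.Str.endswith y " =") = false :=
      fun y hy => hhd y (List.mem_cons_of_mem _ hy)
    have ih' := ih hrest
    intro acc
    by_cases hx : x = ""
    · subst hx
      constructor
      · intro hacc
        have hstep : pvStep acc "" = acc := by
          rcases hacc with h | h
          · simp [pvStep, h]
          · simp [pvStep, h]
        rw [List.foldl_cons, hstep]
        rw [(ih' acc).1 hacc]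
        rw [pvCollapse_blank]
        rw [List.dropWhile_cons]
        simp only [show ("" == "") = true by simp, if_pos]
        rw [pvCollapse_dW_idem rest, ← pvCollapse_dropWhile rest]
      · intro hlast hne
        have h1 : acc ≠ [] ∧ acc.getLast? ≠ some "" := ⟨hne, fun h => hlast "" h rfl⟩
        have hstep : pvStep acc "" = acc ++ [""] := by
          unfold pvStep
          rw [if_pos rfl, if_pos h1]
        rw [List.foldl_cons, hstep, (ih' (acc ++ [""])).1 (Or.inr (by simp)), pvCollapse_blank,
          pvCollapse_dropWhile rest]
        simp
    · have hstep : pvStep acc x = acc ++ [x] := by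
        unfold pvStep
        rw [if_neg hx, hx']
        simp
      have hlast' : (acc ++ [x]).getLast? = some x := by simp
      constructor
      · intro _
        rw [List.foldl_cons, hstep]
        rw [(ih' (acc ++ [x])).2 (fun s hs => by rw [hlast'] at hs; cases hs; exact hx) (by simp)]
        rw [pvCollapse_cons_ne _ _ hx, List.dropWhile_cons]
        simp only [show (x == "") = false by simp [hx], Bool.false_eq_true, if_false]
        simp
      · intro _ _
        rw [List.foldl_cons, hstep]
        rw [(ih' (acc ++ [x])).2 (fun s hs => by rw [hlast'] at hs; cases hs; exact hx) (by simp)]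
        rw [pvCollapse_cons_ne _ _ hx]
        simp

lemma pvChars_strip_nl (cs : List Char) : PySem.Chars.strip ('\n' :: cs) = PySem.Chars.strip cs := by
  simp only [PySem.Chars.strip, PySem.Chars.lstrip, List.dropWhile_cons]
  rw [show PySem.Chars.isspace '\n' = true from by decide]
  simp

lemma pvStrip_join_blank (t : List String) :
    PySem.Str.strip (PySem.Str.join "\n" ("" :: t)) = PySem.Str.strip (PySem.Str.join "\n" t) := by
  cases t with
  | nil => rfl
  | cons h t =>
    apply String.toList_inj.mp
    rw [PySem.Str.toList_strip, PySem.Str.toList_strip, PySem.Str.toList_join, PySem.Str.toList_join]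
    simp only [List.map_cons, show ("" : String).toList = [] from rfl]
    rw [PySem.Chars.join_cons_cons]
    show PySem.Chars.strip ('\n' :: PySem.Chars.join "\n".toList (List.map String.toList (h :: t))) = _
    rw [pvChars_strip_nl, List.map_cons]

lemma pvStrip_join_dropWhile (u : List String) :
    PySem.Str.strip (PySem.Str.join "\n" (u.dropWhile (fun t => t == "")))
      = PySem.Str.strip (PySem.Str.join "\n" u) := by
  induction u with
  | nil => rfl
  | cons h t ih =>
    by_cases hh : h = ""
    · subst hh
      rw [List.dropWhile_cons]
      simp only [show ("" == "") = true by simp, if_pos]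
      rw [ih, pvStrip_join_blank]
    · rw [List.dropWhile_cons]
      simp [hh]

-- ===== VERDICT (by name: the statement is the Claim_ definition above) =====
theorem clean_wikitext_spec : Claim_equal_clean_wikitext := by
  intro text _
  unfold Spec_clean_wikitext
  simp only [clean_wikitext, clean_wikitext_alt]
  generalize (PySem.Str.split? text "\n").getD [] = lines
  have hmap : List.foldl (fun cleaned line =>
      let stripped := PySem.Str.strip line
      if stripped = "" then
        (if cleaned ≠ [] ∧ cleaned.getLast? ≠ some "" then cleaned ++ [""] else cleaned)
      else if PySem.Str.startswith stripped "= " && PySem.Str.endswith stripped " =" then cleaned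
      else cleaned ++ [stripped]) [] lines
      = List.foldl pvStep [] (lines.map (fun ln => PySem.Str.strip ln)) := by
    rw [List.foldl_map]
    rfl
  rw [hmap]
  set L := lines.map (fun ln => PySem.Str.strip ln) with hL
  set kept := L.filter (fun s => !(PySem.Str.startswith s "= " && PySem.Str.endswith s " =")) with hkept
  have hfilter : List.foldl pvStep [] L = List.foldl pvStep [] kept := by
    rw [hkept, List.foldl_filter]
    have hfun : (fun (a : List String) (x : String) =>
        if (!(PySem.Str.startswith x "= " && PySem.Str.endswith x " =")) = true then pvStep a x else a)
        = pvStep := by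
      funext a x
      by_cases hp : (PySem.Str.startswith x "= " && PySem.Str.endswith x " =") = true
      · simp only [hp, Bool.not_true, Bool.false_eq_true, if_false]
        by_cases hx : x = ""
        · subst hx; exact absurd hp (by decide)
        · unfold pvStep
          rw [if_neg hx, hp]
          simp
      · have hp' : (PySem.Str.startswith x "= " && PySem.Str.endswith x " =") = false :=
          Bool.eq_false_iff.mpr hp
        rw [hp']
        simp
    rw [hfun]
  rw [hfilter]
  have hhd : ∀ x ∈ kept, (PySem.Str.startswith x "= " && PySem.Str.endswith x " =") = false := by
    intro x hx
    rw [hkept] at hx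
    have := List.of_mem_filter hx
    rw [Bool.not_eq_true'] at this
    exact this
  rw [(pvFold kept hhd []).1 (Or.inl rfl)]
  rw [List.nil_append]
  exact pvStrip_join_dropWhile (pvCollapse kept)
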